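-- pv_equiv track=rewrite | github.com/psychclerk/RapidP-BASIC | rp_runtime/builtins.py | memcmp
-- ===== SOURCE A (Python) =====
-- import builtins
--
-- def memcmp(buf1, buf2, count):
--     """MEMCMP: compare memory buffers."""
--     count = int(count)
--     for i in range(count):
--         a = buf1[i] if i < builtins.len(buf1) else 0
--         b = buf2[i] if i < builtins.len(buf2) else 0
--         if a < b:
--             return -1
--         if a > b:
--             return 1
--     return 0
-- ===== SOURCE B (Python) =====
-- def memcmp(buf1, buf2, count):
--     """MEMCMP: compare memory buffers."""
--     count = int(count)
--     # Past both buffers, both padded lists are zero, so only min(count, max(len)) entries matter.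
--     m = min(count, max(len(buf1), len(buf2)))
--     p1 = [buf1[i] if i < len(buf1) else 0 for i in range(m)]
--     p2 = [buf2[i] if i < len(buf2) else 0 for i in range(m)]
--     if p1 < p2:
--         return -1
--     if p2 < p1:
--         return 1
--     return 0
-- ===== Notes on version B (the rewrite author's own statement) =====
-- stated objective: simpler
-- what changed: Replaces the manual early-exit per-index loop with materializing both zero-padded lists (truncated at min(count, max(len)), since later entries are equal zeros) and one lexicographic list comparison.
import Mathlib
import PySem

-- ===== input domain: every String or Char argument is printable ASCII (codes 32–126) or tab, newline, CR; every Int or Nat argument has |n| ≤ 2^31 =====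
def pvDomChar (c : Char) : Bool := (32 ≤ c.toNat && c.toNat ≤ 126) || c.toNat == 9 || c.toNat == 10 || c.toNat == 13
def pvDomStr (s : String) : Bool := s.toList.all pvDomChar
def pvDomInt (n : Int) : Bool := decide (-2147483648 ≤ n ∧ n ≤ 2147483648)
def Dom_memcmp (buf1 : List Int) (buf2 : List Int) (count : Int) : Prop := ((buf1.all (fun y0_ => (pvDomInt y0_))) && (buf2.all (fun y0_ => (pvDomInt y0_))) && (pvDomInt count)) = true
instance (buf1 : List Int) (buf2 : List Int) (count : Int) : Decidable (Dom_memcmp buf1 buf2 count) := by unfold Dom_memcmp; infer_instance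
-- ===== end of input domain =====

-- B replaces A's early-exit per-index loop with two materialized zero-padded lists (truncated at
-- min(count, max(len)), since further entries are equal zeros) and one lexicographic comparison.

-- ===== PORT A =====
-- A's 'for i in range(count)' with early returns, as structural recursion over the index list.
def memcmpLoop (buf1 buf2 : List Int) : List Int → Int
  | [] => 0
  | i :: rest =>
    let a := if i < (buf1.length : Int) then (PySem.List.pyGet? buf1 i).getD 0 else 0
    let b := if i < (buf2.length : Int) then (PySem.List.pyGet? buf2 i).getD 0 else 0
    if a < b then -1
    else if a > b then 1
    else memcmpLoop buf1 buf2 rest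

def memcmp (buf1 : List Int) (buf2 : List Int) (count : Int) : Int :=
  memcmpLoop buf1 buf2 (PySem.List.pyRange 0 count 1)

-- ===== PORT B =====
-- Python's '<' on lists of ints: lexicographic with the shorter-prefix rule.
def pyListLtInt : List Int → List Int → Bool
  | _, [] => false
  | [], _ :: _ => true
  | a :: as, b :: bs => if a < b then true else if b < a then false else pyListLtInt as bs

def memcmp_alt (buf1 : List Int) (buf2 : List Int) (count : Int) : Int :=
  let m := min count (max (buf1.length : Int) (buf2.length : Int))
  let p1 := (PySem.List.pyRange 0 m 1).map
    (fun i => if i < (buf1.length : Int) then (PySem.List.pyGet? buf1 i).getD 0 else 0)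
  let p2 := (PySem.List.pyRange 0 m 1).map
    (fun i => if i < (buf2.length : Int) then (PySem.List.pyGet? buf2 i).getD 0 else 0)
  if pyListLtInt p1 p2 then -1
  else if pyListLtInt p2 p1 then 1
  else 0

-- ===== PRECONDITION & SPEC =====
def Spec_memcmp (buf1 : List Int) (buf2 : List Int) (count : Int) (out : Int) : Prop := out = memcmp_alt buf1 buf2 count
instance (buf1 : List Int) (buf2 : List Int) (count : Int) (out : Int) : Decidable (Spec_memcmp buf1 buf2 count out) := by unfold Spec_memcmp; infer_instance

-- ===== CLAIM (what is proved, stated in full; the proofs are below) =====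
def Claim_equal_memcmp : Prop := ∀ (buf1 : List Int) (buf2 : List Int) (count : Int), Dom_memcmp buf1 buf2 count → Spec_memcmp buf1 buf2 count (memcmp buf1 buf2 count)

-- ===== LEMMAS AND PROOFS =====

-- A's loop over any index list equals the compare of the two mapped (padded) lists.
theorem memcmpLoop_eq_cmp (buf1 buf2 : List Int) (idxs : List Int) :
    memcmpLoop buf1 buf2 idxs =
      (let f := fun i => if i < (buf1.length : Int) then (PySem.List.pyGet? buf1 i).getD 0 else 0
       let g := fun i => if i < (buf2.length : Int) then (PySem.List.pyGet? buf2 i).getD 0 else 0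
       if pyListLtInt (idxs.map f) (idxs.map g) then -1
       else if pyListLtInt (idxs.map g) (idxs.map f) then 1
       else 0) := by
  induction idxs with
  | nil => simp [memcmpLoop, pyListLtInt]
  | cons i rest ih =>
    simp only [memcmpLoop, List.map_cons, pyListLtInt]
    rcases lt_trichotomy
      (if i < (buf1.length : Int) then (PySem.List.pyGet? buf1 i).getD 0 else 0)
      (if i < (buf2.length : Int) then (PySem.List.pyGet? buf2 i).getD 0 else 0) with h | h | h
    · simp [h]
    · simp only [h]
      simp only [lt_irrefl, if_false]
      exact ih
    · simp [h]

-- A's loop returns 0 on indices past both buffers (both sides pad with 0).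
theorem memcmpLoop_zero (buf1 buf2 : List Int) (idxs : List Int)
    (h : ∀ i ∈ idxs, (buf1.length : Int) ≤ i ∧ (buf2.length : Int) ≤ i) :
    memcmpLoop buf1 buf2 idxs = 0 := by
  induction idxs with
  | nil => rfl
  | cons i rest ih =>
    have hi := h i (List.mem_cons_self ..)
    simp only [memcmpLoop, if_neg (not_lt.mpr hi.1), if_neg (not_lt.mpr hi.2), lt_irrefl,
      if_false]
    exact ih (fun j hj => h j (List.mem_cons_of_mem _ hj))

-- A's loop over an appended index list: run the first part; if it decides, stop, else run the rest.
theorem memcmpLoop_append (buf1 buf2 : List Int) (xs ys : List Int) :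
    memcmpLoop buf1 buf2 (xs ++ ys) =
      (if memcmpLoop buf1 buf2 xs = 0 then memcmpLoop buf1 buf2 ys
       else memcmpLoop buf1 buf2 xs) := by
  induction xs with
  | nil => simp [memcmpLoop]
  | cons i rest ih =>
    simp only [List.cons_append, memcmpLoop]
    split_ifs with h1 h2 <;> simp_all

-- Truncation: the loop up to count equals the loop up to min(count, max length).
theorem memcmpLoop_truncate (buf1 buf2 : List Int) (count : Int) :
    memcmpLoop buf1 buf2 (PySem.List.pyRange 0 count 1) =
      memcmpLoop buf1 buf2
        (PySem.List.pyRange 0 (min count (max (buf1.length : Int) (buf2.length : Int))) 1) := by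
  set m := min count (max (buf1.length : Int) (buf2.length : Int)) with hm
  by_cases hc : count ≤ m
  · have : m = count := le_antisymm (min_le_left _ _) hc
    rw [this]
  · have hc' : m < count := lt_of_not_ge hc
    have hb : (buf1.length : Int) ≤ m ∧ (buf2.length : Int) ≤ m ∧ 0 ≤ m := by omega
    rw [PySem.List.pyRange_one_append 0 m count hb.2.2 (le_of_lt hc'), memcmpLoop_append]
    have hz : memcmpLoop buf1 buf2 (PySem.List.pyRange m count 1) = 0 := by
      apply memcmpLoop_zero
      intro i hi
      have hmi := (PySem.List.mem_pyRange_one).mp hi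
      exact ⟨le_trans hb.1 hmi.1, le_trans hb.2.1 hmi.1⟩
    rw [hz]
    split <;> simp_all

theorem memcmp_spec : Claim_equal_memcmp := by
  intro buf1 buf2 count _
  unfold Spec_memcmp memcmp memcmp_alt
  rw [memcmpLoop_truncate]
  exact memcmpLoop_eq_cmp buf1 buf2 _
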